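-- pv_equiv track=rewrite | github.com/ckchang117/outfit-generator | agents_service/app.py | detect_duplicate_categories
-- ===== SOURCE A (Python) =====
-- from typing import List, Optional, Dict, Any, Union
--
-- def detect_duplicate_categories(selected_items: List[dict]) -> tuple[bool, str]:
--     """
--     Detect duplicate categories that violate outfit rules.
--     Returns (has_duplicates, error_message)
--     """
--     category_counts = {}
--     items_by_category = {}
--
--     for item in selected_items:
--         cat = item.get('category', '').lower()
--         subcat = item.get('subcategory', '').lower()
--         name = item.get('name', '').lower()
--
--         if cat not in items_by_category:
--             items_by_category[cat] = []
--         items_by_category[cat].append(item)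
--         category_counts[cat] = category_counts.get(cat, 0) + 1
--
--     errors = []
--
--     # Check for multiple bottoms (never allowed)
--     if category_counts.get('bottom', 0) > 1:
--         errors.append(f"Multiple bottoms selected: {[i['name'] for i in items_by_category['bottom']]}")
--
--     # Check for multiple shoes (never allowed)
--     if category_counts.get('shoes', 0) > 1:
--         errors.append(f"Multiple shoes selected: {[i['name'] for i in items_by_category['shoes']]}")
--
--     # Check for multiple dresses (never allowed)
--     if category_counts.get('dress', 0) > 1:
--         errors.append(f"Multiple dresses selected: {[i['name'] for i in items_by_category['dress']]}")
--
--     # Check for dress + bottom combination (illogical)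
--     if category_counts.get('dress', 0) > 0 and category_counts.get('bottom', 0) > 0:
--         errors.append("Cannot wear dress with separate bottom")
--
--     # Check for multiple tops (need to check if it's valid layering)
--     if category_counts.get('top', 0) > 1:
--         tops = items_by_category['top']
--         # Check if it's valid layering
--         has_base = any('tank' in t.get('subcategory', '').lower() or
--                       'undershirt' in t.get('name', '').lower() or
--                       'base layer' in t.get('name', '').lower() for t in tops)
--         has_outer = any('cardigan' in t.get('subcategory', '').lower() or
--                        'blazer' in t.get('subcategory', '').lower() or
--                        'jacket' in t.get('subcategory', '').lower() for t in tops)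
--
--         if not (has_base and has_outer):
--             # Not valid layering - these are duplicate tops
--             errors.append(f"Multiple tops without valid layering: {[t['name'] for t in tops]}")
--
--     # Check for multiple outerwear (usually not needed)
--     if category_counts.get('outerwear', 0) > 1:
--         errors.append(f"Multiple outerwear items: {[i['name'] for i in items_by_category['outerwear']]}")
--
--     if errors:
--         return True, "; ".join(errors)
--     return False, ""
-- ===== SOURCE B (Python) =====
-- def detect_duplicate_categories(selected_items):
--     """Same checks as the dict-building version, but each category list is
--     obtained by a direct filter of the input and the error list is one
--     concatenation of conditional singleton lists."""
--     def items_in(cat):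
--         return [i for i in selected_items if i.get('category', '').lower() == cat]
--
--     def names(items):
--         return [i['name'] for i in items]
--
--     def is_base(t):
--         return ('tank' in t.get('subcategory', '').lower()
--                 or 'undershirt' in t.get('name', '').lower()
--                 or 'base layer' in t.get('name', '').lower())
--
--     def is_outer(t):
--         return ('cardigan' in t.get('subcategory', '').lower()
--                 or 'blazer' in t.get('subcategory', '').lower()
--                 or 'jacket' in t.get('subcategory', '').lower())
--
--     bottoms = items_in('bottom')
--     shoes = items_in('shoes')
--     dresses = items_in('dress')
--     tops = items_in('top')
--     outerwear = items_in('outerwear')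
--     layered = any(is_base(t) for t in tops) and any(is_outer(t) for t in tops)
--
--     errors = (
--         ([f"Multiple bottoms selected: {names(bottoms)}"] if len(bottoms) > 1 else [])
--         + ([f"Multiple shoes selected: {names(shoes)}"] if len(shoes) > 1 else [])
--         + ([f"Multiple dresses selected: {names(dresses)}"] if len(dresses) > 1 else [])
--         + (["Cannot wear dress with separate bottom"] if dresses and bottoms else [])
--         + ([f"Multiple tops without valid layering: {names(tops)}"] if len(tops) > 1 and not layered else [])
--         + ([f"Multiple outerwear items: {names(outerwear)}"] if len(outerwear) > 1 else [])
--     )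
--     return (True, "; ".join(errors)) if errors else (False, "")
-- ===== Notes on version B (the rewrite author's own statement) =====
-- stated objective: simpler
-- what changed: Removed the upfront pass that builds a category_counts dict and an items_by_category dict; B filters the input list once per checked category and builds the error list as a single concatenation of conditional singleton lists, with the same error strings.
import Mathlib
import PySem

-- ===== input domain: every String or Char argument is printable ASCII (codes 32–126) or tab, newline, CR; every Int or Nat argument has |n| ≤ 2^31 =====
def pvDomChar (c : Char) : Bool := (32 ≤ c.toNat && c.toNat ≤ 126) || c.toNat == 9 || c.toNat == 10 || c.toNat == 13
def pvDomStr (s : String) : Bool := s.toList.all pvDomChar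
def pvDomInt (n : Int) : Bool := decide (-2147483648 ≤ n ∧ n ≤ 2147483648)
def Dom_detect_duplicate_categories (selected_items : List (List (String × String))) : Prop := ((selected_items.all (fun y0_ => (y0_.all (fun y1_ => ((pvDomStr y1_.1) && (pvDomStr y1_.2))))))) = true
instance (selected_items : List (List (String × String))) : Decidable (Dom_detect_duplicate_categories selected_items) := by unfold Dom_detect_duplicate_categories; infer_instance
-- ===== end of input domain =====

-- B replaces A's single pass that builds two category-indexed dicts by one on-demand
-- filter of the item list per checked category (objective: simpler, same cost; same
-- return value everywhere A returns).

-- ===== shared helpers (both Pythons compute these identically) =====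

-- item.get(k, '') on a dict given as an association list
def pvGet (i : List (String × String)) (k : String) : String :=
  PySem.Dict.getD (PySem.Dict.mk i) k ""

-- item.get('category', '').lower()
def pvCat (i : List (String × String)) : String := PySem.Str.lower (pvGet i "category")

-- Python repr of a string over the Dom charset (printable ASCII + tab/newline/CR):
-- quote choice and escaping exactly as CPython; exact on Dom
def pvReprStr (s : String) : String :=
  let q : Char := if s.toList.contains '\'' && !(s.toList.contains '"') then '"' else '\''
  String.ofList ([q] ++ (s.toList.flatMap (fun c =>
    if c = '\\' then ['\\', '\\']
    else if c = q then ['\\', q]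
    else if c = '\t' then ['\\', 't']
    else if c = '\n' then ['\\', 'n']
    else if c = '\r' then ['\\', 'r']
    else [c])) ++ [q])

-- f"{[i['name'] for i in items]}" — Python's list repr; i['name'] raises KeyError when
-- 'name' is missing (those inputs are excluded by Pre_; outside it '' stands in)
def pvReprNames (items : List (List (String × String))) : String :=
  "[" ++ PySem.Str.join ", " (items.map (fun i => pvReprStr (pvGet i "name"))) ++ "]"

-- the per-top layering tests (identical generator bodies in A and B)
def pvIsBase (t : List (String × String)) : Bool :=
  PySem.Str.isIn "tank" (PySem.Str.lower (pvGet t "subcategory")) ||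
  PySem.Str.isIn "undershirt" (PySem.Str.lower (pvGet t "name")) ||
  PySem.Str.isIn "base layer" (PySem.Str.lower (pvGet t "name"))

def pvIsOuter (t : List (String × String)) : Bool :=
  PySem.Str.isIn "cardigan" (PySem.Str.lower (pvGet t "subcategory")) ||
  PySem.Str.isIn "blazer" (PySem.Str.lower (pvGet t "subcategory")) ||
  PySem.Str.isIn "jacket" (PySem.Str.lower (pvGet t "subcategory"))

-- ===== PORT A =====
-- the loop body: counts[cat] += 1 and items_by_category[cat].append(item)
def pvStepA (st : PySem.Dict String Int × PySem.Dict String (List (List (String × String))))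
    (item : List (String × String)) :
    PySem.Dict String Int × PySem.Dict String (List (List (String × String))) :=
  let cat := pvCat item
  let byCat := (st.2.setdefault cat []).modify cat [] (fun l => l ++ [item])
  let counts := st.1.insert cat (st.1.getD cat 0 + 1)
  (counts, byCat)

def detect_duplicate_categories (selected_items : List (List (String × String))) : Bool × String :=
  let st := selected_items.foldl pvStepA (PySem.Dict.empty, PySem.Dict.empty)
  let counts := st.1
  let byCat := st.2
  let errors : List String := []
  let errors := if counts.getD "bottom" 0 > 1 then
      errors ++ ["Multiple bottoms selected: " ++ pvReprNames (byCat.getD "bottom" [])] else errors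
  let errors := if counts.getD "shoes" 0 > 1 then
      errors ++ ["Multiple shoes selected: " ++ pvReprNames (byCat.getD "shoes" [])] else errors
  let errors := if counts.getD "dress" 0 > 1 then
      errors ++ ["Multiple dresses selected: " ++ pvReprNames (byCat.getD "dress" [])] else errors
  let errors := if counts.getD "dress" 0 > 0 ∧ counts.getD "bottom" 0 > 0 then
      errors ++ ["Cannot wear dress with separate bottom"] else errors
  let errors := if counts.getD "top" 0 > 1 then
      let tops := byCat.getD "top" []
      let has_base := tops.any pvIsBase
      let has_outer := tops.any pvIsOuter
      if !(has_base && has_outer) then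
        errors ++ ["Multiple tops without valid layering: " ++ pvReprNames tops] else errors
    else errors
  let errors := if counts.getD "outerwear" 0 > 1 then
      errors ++ ["Multiple outerwear items: " ++ pvReprNames (byCat.getD "outerwear" [])] else errors
  if errors ≠ [] then (true, PySem.Str.join "; " errors) else (false, "")

-- ===== PORT B =====
-- items_in(cat): one filter of the input list per category the checks care about
def pvItemsIn (selected_items : List (List (String × String))) (cat : String) :
    List (List (String × String)) :=
  selected_items.filter (fun i => pvCat i == cat)

def detect_duplicate_categories_alt (selected_items : List (List (String × String))) : Bool × String :=
  let bottoms := pvItemsIn selected_items "bottom"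
  let shoes := pvItemsIn selected_items "shoes"
  let dresses := pvItemsIn selected_items "dress"
  let tops := pvItemsIn selected_items "top"
  let outerwear := pvItemsIn selected_items "outerwear"
  let layered := tops.any pvIsBase && tops.any pvIsOuter
  let errors : List String :=
    (if bottoms.length > 1 then ["Multiple bottoms selected: " ++ pvReprNames bottoms] else []) ++
    (if shoes.length > 1 then ["Multiple shoes selected: " ++ pvReprNames shoes] else []) ++
    (if dresses.length > 1 then ["Multiple dresses selected: " ++ pvReprNames dresses] else []) ++
    (if dresses ≠ [] ∧ bottoms ≠ [] then ["Cannot wear dress with separate bottom"] else []) ++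
    (if tops.length > 1 ∧ !layered then
        ["Multiple tops without valid layering: " ++ pvReprNames tops] else []) ++
    (if outerwear.length > 1 then ["Multiple outerwear items: " ++ pvReprNames outerwear] else [])
  if errors ≠ [] then (true, PySem.Str.join "; " errors) else (false, "")

-- ===== PRECONDITION & SPEC =====
-- Pre_ excludes exactly the inputs on which both Pythons raise KeyError: an error
-- message is emitted for a category one of whose items has no 'name' key.
def Pre_detect_duplicate_categories (selected_items : List (List (String × String))) : Prop :=
  (∀ c ∈ (["bottom", "shoes", "dress", "outerwear"] : List String),
      (selected_items.filter (fun i => pvCat i == c)).length > 1 →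
      ∀ i ∈ selected_items.filter (fun i => pvCat i == c), (PySem.Dict.mk i).contains "name") ∧
  ((selected_items.filter (fun i => pvCat i == "top")).length > 1 →
    ¬((selected_items.filter (fun i => pvCat i == "top")).any pvIsBase
      ∧ (selected_items.filter (fun i => pvCat i == "top")).any pvIsOuter) →
    ∀ i ∈ selected_items.filter (fun i => pvCat i == "top"), (PySem.Dict.mk i).contains "name")

instance (selected_items : List (List (String × String))) : Decidable (Pre_detect_duplicate_categories selected_items) := by unfold Pre_detect_duplicate_categories; infer_instance

def pvWitness_detect_duplicate_categories : (List (List (String × String))) :=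
  [[("category", "Bottom"), ("name", "jeans")], [("category", "bottom"), ("name", "skirt")],
   [("category", "dress"), ("name", "sundress")]]

def Spec_detect_duplicate_categories (selected_items : List (List (String × String))) (out : Bool × String) : Prop := out = detect_duplicate_categories_alt selected_items
instance (selected_items : List (List (String × String))) (out : Bool × String) : Decidable (Spec_detect_duplicate_categories selected_items out) := by unfold Spec_detect_duplicate_categories; infer_instance

-- ===== CLAIM (what is proved, stated in full; the proofs are below) =====
def Claim_equal_detect_duplicate_categories : Prop := ∀ (selected_items : List (List (String × String))), Dom_detect_duplicate_categories selected_items → Pre_detect_duplicate_categories selected_items → Spec_detect_duplicate_categories selected_items (detect_duplicate_categories selected_items)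

-- ===== LEMMAS AND PROOFS =====

-- proof-only: a conditional list of error messages
def pvOptList (p : Prop) [Decidable p] (f : List String) : List String := if p then f else []

-- loop invariant of A's first pass: for every category c the dict pair carries the
-- running count and the in-order list of c-items
theorem pvFoldA_inv (l : List (List (String × String)))
    (counts : PySem.Dict String Int) (byCat : PySem.Dict String (List (List (String × String))))
    (c : String) :
    (l.foldl pvStepA (counts, byCat)).1.getD c 0
      = counts.getD c 0 + ((l.filter (fun i => pvCat i == c)).length : Int)
    ∧ (l.foldl pvStepA (counts, byCat)).2.getD c []
      = byCat.getD c [] ++ l.filter (fun i => pvCat i == c) := by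
  induction l generalizing counts byCat with
  | nil => simp
  | cons x xs ih =>
    simp only [List.foldl_cons, List.filter_cons]
    by_cases h : pvCat x = c
    · subst h
      have := ih (pvStepA (counts, byCat) x).1 (pvStepA (counts, byCat) x).2
      simp only [Prod.mk.eta] at this
      rw [this.1, this.2]
      constructor
      · simp [pvStepA]
        ring
      · simp [pvStepA, PySem.Dict.getD_modify_self, PySem.Dict.getD_setdefault_self]
    · have := ih (pvStepA (counts, byCat) x).1 (pvStepA (counts, byCat) x).2
      simp only [Prod.mk.eta] at this
      rw [this.1, this.2]
      have hne : ¬(c = pvCat x) := fun hc => h hc.symm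
      constructor
      · simp [pvStepA, PySem.Dict.getD_insert, hne, h]
      · have h1 : ((byCat.setdefault (pvCat x) []).modify (pvCat x) [] (fun l => l ++ [x])).getD c []
            = byCat.getD c [] := by
          rw [PySem.Dict.getD_modify_of_ne _ _ _ hne]
          rw [PySem.Dict.getD_eq_get?_getD, PySem.Dict.get?_setdefault_of_ne _ _ hne,
            ← PySem.Dict.getD_eq_get?_getD]
        simp [pvStepA, h, h1]

-- 'if p then e ++ f else e' pushed into a conditional tail, so A's accumulator
-- chain flattens to B's concatenation of conditional lists
theorem pv_if_append (p : Prop) [Decidable p] (e f : List String) :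
    (if p then e ++ f else e) = e ++ pvOptList p f := by
  unfold pvOptList; split_ifs <;> simp

theorem pv_opt_opt (p q : Prop) [Decidable p] [Decidable q] (f : List String) :
    pvOptList p (pvOptList q f) = pvOptList (p ∧ q) f := by
  unfold pvOptList; split_ifs <;> simp_all

-- ===== VERDICT (by name: the statement is the Claim_ definition above) =====
set_option maxHeartbeats 1000000 in
theorem detect_duplicate_categories_spec : Claim_equal_detect_duplicate_categories := by
  intro xs _ _
  unfold Spec_detect_duplicate_categories detect_duplicate_categories detect_duplicate_categories_alt
  have hc := fun c => (pvFoldA_inv xs PySem.Dict.empty PySem.Dict.empty c).1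
  have hb := fun c => (pvFoldA_inv xs PySem.Dict.empty PySem.Dict.empty c).2
  simp only [PySem.Dict.getD_empty, List.nil_append, zero_add] at hc hb
  simp only [hc, hb, pvItemsIn, pv_if_append, pv_opt_opt, List.nil_append]
  simp only [pvOptList, Nat.one_lt_cast, Nat.cast_pos, List.length_pos_iff, List.append_assoc]
  rfl
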